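-- pv_equiv track=rewrite | github.com/alexandraback/datacollection | solutions_5634697451274240_0/Python/serialk/b.py | answer
-- ===== SOURCE A (Python) =====
-- def answer(s):
--     r = 0
--     cur = s[0]
--     for c in s:
--         if c != cur:
--             cur = c
--             r += 1
--     if cur == '-':
--         r += 1
--     return r
-- ===== SOURCE B (Python) =====
-- def answer(s):
--     # Divide and conquer: transitions(s) = transitions(left) + transitions(right)
--     # + 1 if the boundary characters differ; recursion bottoms out on length <= 1.
--     def trans(t):
--         if len(t) <= 1:
--             return 0
--         m = len(t) // 2
--         return trans(t[:m]) + trans(t[m:]) + (t[m - 1] != t[m])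
--     return trans(s) + (s[-1] == '-')
-- ===== Notes on version B (the rewrite author's own statement) =====
-- stated objective: alternative
-- what changed: Replaces A's linear stateful scan (carrying the current character through one pass) by a divide-and-conquer recursion: split the string at the midpoint, count transitions in each half independently and add one if the boundary pair differs; transition counts are additive over concatenation.
import Mathlib
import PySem

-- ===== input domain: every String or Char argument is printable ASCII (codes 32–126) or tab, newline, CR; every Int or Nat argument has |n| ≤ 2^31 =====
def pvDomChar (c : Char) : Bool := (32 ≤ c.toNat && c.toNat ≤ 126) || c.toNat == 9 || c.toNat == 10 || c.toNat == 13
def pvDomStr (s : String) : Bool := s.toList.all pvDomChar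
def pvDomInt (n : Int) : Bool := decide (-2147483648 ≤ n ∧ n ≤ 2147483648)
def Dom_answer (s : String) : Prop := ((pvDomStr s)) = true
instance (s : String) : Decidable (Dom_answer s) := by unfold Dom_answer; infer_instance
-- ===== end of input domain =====

-- B counts transitions by divide-and-conquer (split at the midpoint, add the boundary)
-- instead of A's linear stateful scan — an alternative decomposition; return value only.

-- ===== PORT A =====
def answer (s : String) : Int :=
  match PySem.Str.pyGet? s 0 with
  | none => 0   -- s[0] raises IndexError on the empty string; excluded by Pre_answer
  | some c0 =>
    let st := s.toList.foldl (fun (p : Int × Char) c => if c ≠ p.2 then (p.1 + 1, c) else p) (0, c0)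
    if st.2 = '-' then st.1 + 1 else st.1

-- ===== PORT B =====
-- trans(t): split at m = len(t)//2; t[:m] / t[m:] are List.take/List.drop (slice with
-- 0 ≤ m ≤ len, exact); t[m-1], t[m] are PySem.List.pyGet? (both in range when len ≥ 2).
def transDC (l : List Char) : Int :=
  if l.length ≤ 1 then 0
  else
    let m := l.length / 2
    transDC (l.take m) + transDC (l.drop m) +
      (if PySem.List.pyGet? l ((m : Int) - 1) ≠ PySem.List.pyGet? l (m : Int) then 1 else 0)
termination_by l.length
decreasing_by
  · simp only [List.length_take]; omega
  · simp only [List.length_drop]; omega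

def answer_alt (s : String) : Int :=
  match PySem.Str.pyGet? s (-1) with
  | none => 0   -- s[-1] raises IndexError on the empty string; excluded by Pre_answer
  | some last => transDC s.toList + (if last = '-' then 1 else 0)

-- ===== PRECONDITION & SPEC =====
-- Pre_ excludes only the empty string, on which both A (s[0]) and B (s[-1]) raise IndexError.
def Pre_answer (s : String) : Prop := s ≠ ""
instance (s : String) : Decidable (Pre_answer s) := by unfold Pre_answer; infer_instance
def pvWitness_answer : String := ("ab-")

def Spec_answer (s : String) (out : Int) : Prop := out = answer_alt s
instance (s : String) (out : Int) : Decidable (Spec_answer s out) := by unfold Spec_answer; infer_instance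

-- ===== CLAIM (what is proved, stated in full; the proofs are below) =====
def Claim_equal_answer : Prop := ∀ (s : String), Dom_answer s → Pre_answer s → Spec_answer s (answer s)

-- ===== LEMMAS AND PROOFS =====
-- sequential transition count: the common yardstick both ports are reduced to
def countTrans : List Char → Int
  | [] => 0
  | [_] => 0
  | a :: b :: t => (if a = b then 0 else 1) + countTrans (b :: t)

lemma ct_app (x : Char) (xt : List Char) (y : Char) (yt : List Char) :
    countTrans (x :: xt ++ y :: yt)
      = countTrans (x :: xt) + (if xt.getLastD x = y then 0 else 1) + countTrans (y :: yt) := by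
  induction xt generalizing x with
  | nil => simp [countTrans]
  | cons a t ih =>
    have h1 : x :: (a :: t) ++ y :: yt = x :: ((a :: t) ++ y :: yt) := rfl
    rw [h1, show countTrans (x :: ((a :: t) ++ y :: yt))
        = (if x = a then 0 else 1) + countTrans ((a :: t) ++ y :: yt) from rfl,
      ih a, List.getLastD_cons,
      show countTrans (x :: a :: t) = (if x = a then 0 else 1) + countTrans (a :: t) from rfl]
    ring

lemma getElem?_last (x : Char) (xt : List Char) : (x :: xt)[xt.length]? = some (xt.getLastD x) := by
  induction xt generalizing x with
  | nil => rfl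
  | cons a t ih =>
    rw [show (a :: t).length = t.length + 1 from rfl, List.getElem?_cons_succ, ih,
      List.getLastD_cons]

lemma transDC_eq (l : List Char) : transDC l = countTrans l := by
  induction hn : l.length using Nat.strong_induction_on generalizing l with
  | _ n ih =>
    subst hn
    by_cases h : l.length ≤ 1
    · rw [transDC]
      simp only [h, if_true]
      match l, h with
      | [], _ => rfl
      | [_], _ => rfl
    · rw [Nat.not_le] at h
      set m := l.length / 2 with hm
      have hm1 : 1 ≤ m := by omega
      have hmlt : m < l.length := by omega
      have htake : (l.take m).length = m := by simp; omega
      have hdrop : (l.drop m).length = l.length - m := by simp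
      rw [transDC]
      simp only [Nat.not_le.mpr h, if_false]
      rw [ih (l.take m).length (by omega) _ rfl, ih (l.drop m).length (by omega) _ rfl]
      -- l = take ++ drop; both halves nonempty
      obtain ⟨x, xt, hx⟩ := List.exists_cons_of_ne_nil
        (show l.take m ≠ [] from by intro h0; rw [h0] at htake; simp at htake; omega)
      obtain ⟨y, yt, hy⟩ := List.exists_cons_of_ne_nil
        (show l.drop m ≠ [] from by intro h0; rw [h0] at hdrop; simp at hdrop; omega)
      have hsplit : l = (x :: xt) ++ (y :: yt) := by rw [← hx, ← hy, List.take_append_drop]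
      -- the two indexed characters
      have hlenxxt : (x :: xt).length = m := by rw [← hx]; exact htake
      have hget1 : PySem.List.pyGet? l ((m : Int) - 1) = some (xt.getLastD x) := by
        have hcast : ((m : Int) - 1) = ((m - 1 : Nat) : Int) := by omega
        rw [hcast, PySem.List.pyGet?_natCast,
          show l[(m-1 : Nat)]? = (l.take m)[(m-1 : Nat)]? from
            (List.getElem?_take_of_lt (by omega)).symm, hx,
          show (m - 1 : Nat) = xt.length from by simp at hlenxxt; omega]
        exact getElem?_last x xt
      have hget2 : PySem.List.pyGet? l (m : Int) = some y := by
        rw [PySem.List.pyGet?_natCast, hsplit, ← hlenxxt]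
        simp
      rw [hget1, hget2, hx, hy, hsplit, ct_app]
      simp only [ne_eq, Option.some.injEq]
      split_ifs <;> ring

lemma foldA (l : List Char) (r : Int) (cur : Char) :
    l.foldl (fun (p : Int × Char) c => if c ≠ p.2 then (p.1 + 1, c) else p) (r, cur)
      = (r + countTrans (cur :: l), l.getLastD cur) := by
  induction l generalizing r cur with
  | nil => simp [countTrans]
  | cons c t ih =>
    by_cases h : c = cur
    · subst h
      have h1 : List.foldl (fun (p : Int × Char) c => if c ≠ p.2 then (p.1 + 1, c) else p) (r, c) (c :: t)
          = List.foldl (fun (p : Int × Char) c => if c ≠ p.2 then (p.1 + 1, c) else p) (r, c) t := by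
        simp
      rw [h1, ih, List.getLastD_cons,
        show countTrans (c :: c :: t) = countTrans (c :: t) from by simp [countTrans]]
    · have h1 : List.foldl (fun (p : Int × Char) c => if c ≠ p.2 then (p.1 + 1, c) else p) (r, cur) (c :: t)
          = List.foldl (fun (p : Int × Char) c => if c ≠ p.2 then (p.1 + 1, c) else p) (r + 1, c) t := by
        simp [h]
      rw [h1, ih, List.getLastD_cons,
        show countTrans (cur :: c :: t) = 1 + countTrans (c :: t) from by
          simp [countTrans, Ne.symm h]]
      refine Prod.ext ?_ rfl
      simp only; ring

lemma lastD_eq (c0 : Char) (t : List Char) : (c0 :: t).getLast? = some (t.getLastD c0) := by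
  induction t generalizing c0 with
  | nil => simp
  | cons b u ih => rw [List.getLast?_cons_cons, ih, List.getLastD_cons]

-- ===== VERDICT (by name: the statement is the Claim_ definition above) =====
theorem answer_spec : Claim_equal_answer := by
  intro s _ hpre
  have hne : s.toList ≠ [] := fun h => hpre (String.toList_eq_nil_iff.mp h)
  obtain ⟨c0, t, hl⟩ := List.exists_cons_of_ne_nil hne
  unfold Spec_answer answer answer_alt
  simp only [PySem.Str.pyGet?, PySem.Chars.pyGet?_eq_listPyGet?, hl,
    PySem.List.pyGet?_zero_cons, PySem.List.pyGet?_neg_one, lastD_eq]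
  have h1 : List.foldl (fun (p : Int × Char) c => if c ≠ p.2 then (p.1 + 1, c) else p) (0, c0) (c0 :: t)
      = List.foldl (fun (p : Int × Char) c => if c ≠ p.2 then (p.1 + 1, c) else p) (0, c0) t := by
    simp
  rw [h1, foldA, transDC_eq]
  split_ifs <;> ring
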